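-- pv_equiv track=rewrite | github.com/HanJiaxing521/huawei | passCross.py | tailPosition
-- ===== SOURCE A (Python) =====
-- def tailPosition(Road, laneNum, RoadLength):
--     """return the tails lyst of different lanes of the next road."""
--     tailLyst = []
--     for lane in range(laneNum):
--         tail = RoadLength - 1
--         while tail >= 0:
--             if Road[tail][lane] != None:
--                 break
--             tail -= 1
--         tailLyst.append(tail)
--     return tailLyst
-- ===== SOURCE B (Python) =====
-- def tailPosition(Road, laneNum, RoadLength):
--     """return the tails lyst of different lanes of the next road."""
--     tailLyst = [-1] * laneNum
--     unresolved = set(range(laneNum))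
--     tail = RoadLength - 1
--     while tail >= 0 and unresolved:
--         row = Road[tail]
--         for lane in list(unresolved):
--             if row[lane] is not None:
--                 tailLyst[lane] = tail
--                 unresolved.discard(lane)
--         tail -= 1
--     return tailLyst
-- ===== Notes on version B (the rewrite author's own statement) =====
-- stated objective: alternative
-- what changed: Replaces the independent top-down column scan per lane with one top-down pass over rows that maintains a set of still-unresolved lanes and stops as soon as every lane has found its tail.
-- intended difference: For RoadLength < 0 with laneNum > 0 (a degenerate negative road length), A returns RoadLength-1 for every lane (leftover loop-counter state), while B returns the intended empty-lane sentinel -1 that A itself returns for RoadLength = 0. — e.g. on tailPosition([], 1, -1): A returns [-2], B returns [-1]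
-- outside the precondition, e.g. on tailPosition([[], [5]], 1, 2): A returns [1], B returns [1]
import Mathlib
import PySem

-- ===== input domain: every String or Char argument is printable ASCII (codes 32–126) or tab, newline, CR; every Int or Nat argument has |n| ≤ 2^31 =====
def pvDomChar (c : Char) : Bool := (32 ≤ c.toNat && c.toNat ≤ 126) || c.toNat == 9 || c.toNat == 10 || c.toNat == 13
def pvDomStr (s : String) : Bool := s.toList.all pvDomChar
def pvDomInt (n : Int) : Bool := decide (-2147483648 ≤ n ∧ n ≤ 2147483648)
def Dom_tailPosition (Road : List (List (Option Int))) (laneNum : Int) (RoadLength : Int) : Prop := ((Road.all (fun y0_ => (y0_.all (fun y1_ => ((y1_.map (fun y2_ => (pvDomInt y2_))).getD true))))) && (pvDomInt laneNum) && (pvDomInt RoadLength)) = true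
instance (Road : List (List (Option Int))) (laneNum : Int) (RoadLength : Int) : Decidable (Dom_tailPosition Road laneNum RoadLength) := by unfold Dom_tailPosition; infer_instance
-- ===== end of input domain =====

-- B replaces A's per-lane top-down column scan by one top-down pass over rows that maintains the
-- set of still-unresolved lanes (alternative decomposition; early exit once every lane is resolved).

-- ===== PORT A =====
-- inner 'while tail >= 0: if Road[tail][lane] != None: break; tail -= 1' of A; an out-of-range
-- access (where Python would raise) is read as None here.
def tailScanA (Road : List (List (Option Int))) (lane : Int) (tail : Int) : Int :=
  if _h : 0 ≤ tail then
    if (PySem.List.pyGet? ((PySem.List.pyGet? Road tail).getD []) lane).getD none ≠ none then tail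
    else tailScanA Road lane (tail - 1)
  else tail
termination_by (tail + 1).toNat
decreasing_by omega

def tailPosition (Road : List (List (Option Int))) (laneNum : Int) (RoadLength : Int) : List Int :=
  (PySem.List.pyRange 0 laneNum 1).map (fun lane => tailScanA Road lane (RoadLength - 1))

-- ===== PORT B =====
-- body of B's 'for lane in list(unresolved)' loop: lane is a nonnegative lane index, so Python's
-- 'tailLyst[lane] = tail' is List.set at lane.toNat; 'unresolved.discard(lane)' is the filter;
-- an out-of-range 'row[lane]' (where Python would raise) is read as None here.
def laneStep (row : List (Option Int)) (tail : Int) (s : List Int × List Int) (lane : Int) :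
    List Int × List Int :=
  if (PySem.List.pyGet? row lane).getD none ≠ none then
    (s.1.set lane.toNat tail, s.2.filter (fun l => l ≠ lane))
  else s

-- B's 'while tail >= 0 and unresolved:' loop
def tailLoopB (Road : List (List (Option Int))) (tail : Int)
    (tailLyst unresolved : List Int) : List Int :=
  if 0 ≤ tail ∧ unresolved ≠ [] then
    let row := (PySem.List.pyGet? Road tail).getD []
    let st := unresolved.foldl (laneStep row tail) (tailLyst, unresolved)
    tailLoopB Road (tail - 1) st.1 st.2
  else tailLyst
termination_by (tail + 1).toNat
decreasing_by omega

def tailPosition_alt (Road : List (List (Option Int))) (laneNum : Int) (RoadLength : Int) : List Int :=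
  tailLoopB Road (RoadLength - 1) (List.replicate laneNum.toNat (-1)) (PySem.List.pyRange 0 laneNum 1)

-- ===== PRECONDITION & SPEC =====
-- Pre_ excludes the inputs where a lane's downward scan would index outside Road or outside a row
-- (IndexError); it conservatively requires every row below the start index to be wide enough, which
-- also excludes some inputs where A happens to break before reaching a short row — on those both
-- programs return the same value anyway.
def Pre_tailPosition (Road : List (List (Option Int))) (laneNum : Int) (RoadLength : Int) : Prop :=
  0 < laneNum → 0 < RoadLength →
    (RoadLength ≤ (Road.length : Int) ∧
     ∀ r ∈ Road.take RoadLength.toNat, laneNum ≤ (r.length : Int))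
instance (Road : List (List (Option Int))) (laneNum : Int) (RoadLength : Int) : Decidable (Pre_tailPosition Road laneNum RoadLength) := by unfold Pre_tailPosition; infer_instance

def pvWitness_tailPosition : List (List (Option Int)) × Int × Int := ([[some 1], [none]], 1, 2)

-- For RoadLength < 0 with laneNum > 0 (a degenerate negative road length), A returns RoadLength-1
-- for every lane (leftover loop-counter state), while B returns the intended empty-lane sentinel -1
-- that A itself returns for RoadLength = 0.
def D_tailPosition (Road : List (List (Option Int))) (laneNum : Int) (RoadLength : Int) : Prop :=
  RoadLength < 0 ∧ 0 < laneNum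
instance (Road : List (List (Option Int))) (laneNum : Int) (RoadLength : Int) : Decidable (D_tailPosition Road laneNum RoadLength) := by unfold D_tailPosition; infer_instance

def Spec_tailPosition (Road : List (List (Option Int))) (laneNum : Int) (RoadLength : Int) (out : List Int) : Prop := ¬ D_tailPosition Road laneNum RoadLength → out = tailPosition_alt Road laneNum RoadLength
instance (Road : List (List (Option Int))) (laneNum : Int) (RoadLength : Int) (out : List Int) : Decidable (Spec_tailPosition Road laneNum RoadLength out) := by unfold Spec_tailPosition; infer_instance

def pvDiffWitness_tailPosition : List (List (Option Int)) × Int × Int := ([], 1, -1)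
def pvDiffWitnessOut_tailPosition : (List Int) × (List Int) := ([-2], [-1])

-- ===== CLAIM (what is proved, stated in full; the proofs are below) =====
def Claim_unchanged_tailPosition : Prop := ∀ (Road : List (List (Option Int))) (laneNum : Int) (RoadLength : Int), Dom_tailPosition Road laneNum RoadLength → Pre_tailPosition Road laneNum RoadLength → Spec_tailPosition Road laneNum RoadLength (tailPosition Road laneNum RoadLength)
def Claim_changed_tailPosition : Prop := Dom_tailPosition (pvDiffWitness_tailPosition.1) (pvDiffWitness_tailPosition.2.1) (pvDiffWitness_tailPosition.2.2) ∧ Pre_tailPosition (pvDiffWitness_tailPosition.1) (pvDiffWitness_tailPosition.2.1) (pvDiffWitness_tailPosition.2.2) ∧ D_tailPosition (pvDiffWitness_tailPosition.1) (pvDiffWitness_tailPosition.2.1) (pvDiffWitness_tailPosition.2.2) ∧ tailPosition (pvDiffWitness_tailPosition.1) (pvDiffWitness_tailPosition.2.1) (pvDiffWitness_tailPosition.2.2) = pvDiffWitnessOut_tailPosition.1 ∧ tailPosition_alt (pvDiffWitness_tailPosition.1) (pvDiffWitness_tailPosition.2.1) (pvDiffWitness_tailPosition.2.2) = pvDiffWitnessOut_tailPosition.2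 ∧ pvDiffWitnessOut_tailPosition.1 ≠ pvDiffWitnessOut_tailPosition.2
def Claim_exact_tailPosition : Prop := ∀ (Road : List (List (Option Int))) (laneNum : Int) (RoadLength : Int), Dom_tailPosition Road laneNum RoadLength → Pre_tailPosition Road laneNum RoadLength → D_tailPosition Road laneNum RoadLength → tailPosition Road laneNum RoadLength ≠ tailPosition_alt Road laneNum RoadLength

-- ===== LEMMAS AND PROOFS =====

-- the topmost index ≤ tail whose cell in this lane is non-None (shared spec of both loops)
def topHit (Road : List (List (Option Int))) (lane : Int) (tail : Int) : Option Int :=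
  if 0 ≤ tail then
    if (PySem.List.pyGet? ((PySem.List.pyGet? Road tail).getD []) lane).getD none ≠ none then some tail
    else topHit Road lane (tail - 1)
  else none
termination_by (tail + 1).toNat
decreasing_by omega

lemma scanA_eq (Road : List (List (Option Int))) (lane : Int) :
    ∀ (n : Nat) (tail : Int), (tail + 1).toNat = n → -1 ≤ tail →
    tailScanA Road lane tail = (topHit Road lane tail).getD (-1) := by
  intro n
  induction n with
  | zero =>
    intro tail hn h1
    have ht : tail = -1 := by omega
    subst ht
    rw [tailScanA, topHit]
    norm_num
  | succ k ih =>
    intro tail hn h1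
    have ht : 0 ≤ tail := by omega
    rw [tailScanA, topHit]
    simp only [ht, if_true]
    split_ifs with hc
    all_goals first
      | simp
      | exact ih (tail - 1) (by omega) (by omega)

lemma foldl_laneStep_fst (row : List (Option Int)) (tail : Int) :
    ∀ (L : List Int) (tl u : List Int), (∀ l ∈ L, 0 ≤ l) →
    ((L.foldl (laneStep row tail) (tl, u)).1.length = tl.length ∧
     ∀ j : Nat, j < tl.length →
       (L.foldl (laneStep row tail) (tl, u)).1.getD j 0 =
         if (j : Int) ∈ L ∧ (PySem.List.pyGet? row (j : Int)).getD none ≠ none then tail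
         else tl.getD j 0) := by
  intro L
  induction L with
  | nil => intro tl u _; simp
  | cons a L ih =>
    intro tl u hL
    have ha : 0 ≤ a := hL a (List.mem_cons_self)
    have hL' : ∀ l ∈ L, 0 ≤ l := fun l hl => hL l (List.mem_cons_of_mem _ hl)
    simp only [List.foldl_cons]
    by_cases hc : (PySem.List.pyGet? row a).getD none ≠ none
    · rw [show laneStep row tail (tl, u) a
          = (tl.set a.toNat tail, u.filter (fun l => l ≠ a)) by simp [laneStep, hc]]
      obtain ⟨hlen, hget⟩ := ih (tl.set a.toNat tail) (u.filter (fun l => l ≠ a)) hL'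
      refine ⟨by simpa using hlen, fun j hj => ?_⟩
      rw [hget j (by simpa using hj)]
      by_cases hja : (j : Int) = a
      · have hhit : (PySem.List.pyGet? row (j : Int)).getD none ≠ none := by rw [hja]; exact hc
        have hset : (tl.set a.toNat tail).getD j 0 = tail := by
          rw [List.getD_eq_getElem _ _ (by simpa using hj),
            show a.toNat = j by omega, List.getElem_set_self]
        have hset' : (tl.set a.toNat tail)[j]?.getD 0 = tail := hset
        have hc' : ¬ (PySem.List.pyGet? row a).getD none = none := hc
        by_cases haL : a ∈ L
        · simp [haL, hc', hja]
        · simp [haL, hc', hja, hset']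
      · have hne : a.toNat ≠ j := by omega
        have hset : (tl.set a.toNat tail).getD j 0 = tl.getD j 0 := by
          rw [List.getD_eq_getElem _ _ (by simpa using hj), List.getElem_set_ne hne,
            ← List.getD_eq_getElem _ _ hj]
        rw [hset]
        congr 1
        simp [List.mem_cons, hja]
    · rw [show laneStep row tail (tl, u) a = (tl, u) by simp [laneStep, hc]]
      obtain ⟨hlen, hget⟩ := ih tl u hL'
      refine ⟨hlen, fun j hj => ?_⟩
      rw [hget j hj]
      congr 1
      simp only [List.mem_cons, eq_iff_iff]
      constructor
      · rintro ⟨h1, h2⟩; exact ⟨Or.inr h1, h2⟩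
      · rintro ⟨h1 | h1, h2⟩
        · exact absurd (h1 ▸ h2) hc
        · exact ⟨h1, h2⟩

lemma foldl_laneStep_snd (row : List (Option Int)) (tail : Int) :
    ∀ (L : List Int) (tl u : List Int),
    (L.foldl (laneStep row tail) (tl, u)).2 =
      u.filter (fun l => decide ¬(l ∈ L ∧ (PySem.List.pyGet? row l).getD none ≠ none)) := by
  intro L
  induction L with
  | nil => intro tl u; simp
  | cons a L ih =>
    intro tl u
    simp only [List.foldl_cons]
    by_cases hc : (PySem.List.pyGet? row a).getD none ≠ none
    · rw [show laneStep row tail (tl, u) a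
          = (tl.set a.toNat tail, u.filter (fun l => l ≠ a)) by simp [laneStep, hc]]
      rw [ih]
      rw [List.filter_filter]
      apply List.filter_congr
      intro l _
      by_cases hla : l = a
      · subst hla
        simp [hc, List.mem_cons]
      · simp [hla, List.mem_cons]
    · rw [show laneStep row tail (tl, u) a = (tl, u) by simp [laneStep, hc]]
      rw [ih]
      apply List.filter_congr
      intro l _
      by_cases hla : l = a
      · subst hla
        simp only [List.mem_cons, decide_eq_decide]
        simp at hc
        simp [hc]
      · simp [hla, List.mem_cons]

lemma loopB_getD (Road : List (List (Option Int))) :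
    ∀ (n : Nat) (tail : Int) (tl u : List Int), (tail + 1).toNat = n → (∀ l ∈ u, 0 ≤ l) →
    ((tailLoopB Road tail tl u).length = tl.length ∧
     ∀ j : Nat, j < tl.length →
       (tailLoopB Road tail tl u).getD j 0 =
         if (j : Int) ∈ u then (topHit Road (j : Int) tail).getD (tl.getD j 0) else tl.getD j 0) := by
  intro n
  induction n with
  | zero =>
    intro tail tl u hn hu
    have ht : tail < 0 := by omega
    rw [tailLoopB, if_neg (by intro h; exact absurd h.1 (by omega))]
    refine ⟨rfl, fun j hj => ?_⟩
    by_cases hjm : (j : Int) ∈ u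
    · rw [if_pos hjm, topHit, if_neg (by omega)]
      simp
    · rw [if_neg hjm]
  | succ k ih =>
    intro tail tl u hn hu
    by_cases hgo : 0 ≤ tail ∧ u ≠ []
    case neg =>
      rw [tailLoopB, if_neg hgo]
      refine ⟨rfl, fun j hj => ?_⟩
      rcases (not_and_or.mp hgo) with ht | hu0
      · by_cases hjm : (j : Int) ∈ u
        · rw [if_pos hjm, topHit, if_neg (by omega)]
          simp
        · rw [if_neg hjm]
      · have : u = [] := by simpa using hu0
        subst this
        simp
    case pos =>
      rw [tailLoopB, if_pos hgo]
      simp only []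
      set row := (PySem.List.pyGet? Road tail).getD [] with hrow
      obtain ⟨hf1len, hf1get⟩ := foldl_laneStep_fst row tail u tl u hu
      have hf2 := foldl_laneStep_snd row tail u tl u
      set st := u.foldl (laneStep row tail) (tl, u) with hst
      have hu' : ∀ l ∈ st.2, 0 ≤ l := by
        rw [hf2]; intro l hl; exact hu l (List.mem_of_mem_filter hl)
      obtain ⟨hlen, hget⟩ := ih (tail - 1) st.1 st.2 (by omega) hu'
      refine ⟨by rw [hlen, hf1len], fun j hj => ?_⟩
      rw [hget j (by rw [hf1len]; exact hj), hf1get j hj]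
      have hmem2 : ((j : Int) ∈ st.2) ↔
          ((j : Int) ∈ u ∧ ¬ (PySem.List.pyGet? row (j : Int)).getD none ≠ none) := by
        rw [hf2]
        simp only [List.mem_filter, decide_not, Bool.not_eq_eq_eq_not, Bool.not_true,
          decide_eq_false_iff_not]
        constructor
        · rintro ⟨h1, h2⟩; exact ⟨h1, fun hh => h2 ⟨h1, hh⟩⟩
        · rintro ⟨h1, h2⟩; exact ⟨h1, fun hh => h2 hh.2⟩
      by_cases hjm : (j : Int) ∈ u
      · by_cases hhit : (PySem.List.pyGet? row (j : Int)).getD none ≠ none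
        · have h2 : ¬ (j : Int) ∈ st.2 := by rw [hmem2]; tauto
          rw [if_neg h2, if_pos ⟨hjm, hhit⟩, if_pos hjm]
          rw [topHit, if_pos hgo.1, ← hrow, if_pos hhit]
          rfl
        · have h2 : (j : Int) ∈ st.2 := hmem2.mpr ⟨hjm, hhit⟩
          rw [if_pos h2, if_neg (by tauto), if_pos hjm]
          congr 1
          conv_rhs => rw [topHit, if_pos hgo.1, ← hrow, if_neg hhit]
      · have h2 : ¬ (j : Int) ∈ st.2 := fun h => hjm (hmem2.mp h).1
        rw [if_neg h2, if_neg (by tauto), if_neg hjm]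

theorem main (Road : List (List (Option Int))) (laneNum : Int) (RoadLength : Int)
    (hD : ¬ (RoadLength < 0 ∧ 0 < laneNum)) :
    tailPosition Road laneNum RoadLength = tailPosition_alt Road laneNum RoadLength := by
  by_cases hl : laneNum ≤ 0
  · have hr : PySem.List.pyRange 0 laneNum 1 = [] := by
      rw [PySem.List.pyRange_one, show (laneNum - 0).toNat = 0 by omega]
      simp
    have h0 : laneNum.toNat = 0 := by omega
    rw [tailPosition, tailPosition_alt, hr, h0]
    rw [tailLoopB]
    simp
  · have hR : 0 ≤ RoadLength := by omega
    have hnn : ∀ l ∈ PySem.List.pyRange 0 laneNum 1, 0 ≤ l := by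
      intro l hl'
      rw [PySem.List.mem_pyRange_one] at hl'
      exact hl'.1
    obtain ⟨hlen, hget⟩ := loopB_getD Road (RoadLength - 1 + 1).toNat (RoadLength - 1)
      (List.replicate laneNum.toNat (-1)) (PySem.List.pyRange 0 laneNum 1) rfl hnn
    have hlenr : (PySem.List.pyRange 0 laneNum 1).length = laneNum.toNat := by
      rw [PySem.List.length_pyRange_one]; omega
    apply List.ext_getElem
    · rw [tailPosition, tailPosition_alt, hlen]
      rw [List.length_map, hlenr, List.length_replicate]
    · intro j h1 h2
      have hj : j < laneNum.toNat := by
        have h1' : j < (tailPosition Road laneNum RoadLength).length := h1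
        simp only [tailPosition, List.length_map] at h1'
        rw [hlenr] at h1'
        exact h1' 
      calc (tailPosition Road laneNum RoadLength)[j]'h1
          = (tailPosition Road laneNum RoadLength).getD j 0 :=
            (List.getD_eq_getElem _ _ h1).symm
        _ = tailScanA Road (j : Int) (RoadLength - 1) := by
            rw [tailPosition,
              List.getD_eq_getElem _ _ (by rw [List.length_map, hlenr]; exact hj),
              List.getElem_map, PySem.List.getElem_pyRange_one]
            norm_num
        _ = (topHit Road (j : Int) (RoadLength - 1)).getD (-1) :=
            scanA_eq Road (j : Int) (RoadLength - 1 + 1).toNat (RoadLength - 1) rfl (by omega)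
        _ = (tailPosition_alt Road laneNum RoadLength).getD j 0 := by
            rw [tailPosition_alt, hget j (by simpa using hj)]
            rw [if_pos (by rw [PySem.List.mem_pyRange_one]; omega)]
            congr 1
            rw [List.getD_eq_getElem _ _ (by simpa using hj)]
            simp
        _ = (tailPosition_alt Road laneNum RoadLength)[j]'h2 :=
            List.getD_eq_getElem _ _ h2

theorem tight (Road : List (List (Option Int))) (laneNum : Int) (RoadLength : Int)
    (hD : RoadLength < 0 ∧ 0 < laneNum) :
    tailPosition Road laneNum RoadLength ≠ tailPosition_alt Road laneNum RoadLength := by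
  intro h
  have h0 := congrArg (fun l => l[0]?) h
  obtain ⟨n, hn⟩ : ∃ n, laneNum.toNat = n + 1 := ⟨laneNum.toNat - 1, by omega⟩
  have hr := PySem.List.pyRange_one_cons (a := 0) (b := laneNum) (by omega)
  simp only [tailPosition, tailPosition_alt, hr, hn, List.replicate_succ, List.map_cons] at h0
  rw [tailLoopB, if_neg (by intro hh; exact absurd hh.1 (by omega))] at h0
  simp only [List.getElem?_cons_zero, Option.some_inj] at h0
  rw [tailScanA, dif_neg (by omega)] at h0
  omega


lemma changed_A : tailPosition [] 1 (-1) = [-2] := by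
  have hr := PySem.List.pyRange_one_cons (a := 0) (b := (1:Int)) (by omega)
  norm_num at hr
  rw [tailPosition, hr]
  simp only [List.map_cons, List.map_nil]
  rw [tailScanA, dif_neg (by omega)]
  norm_num

lemma changed_B : tailPosition_alt [] 1 (-1) = [-1] := by
  rw [tailPosition_alt, tailLoopB, if_neg (by intro hh; exact absurd hh.1 (by omega))]
  rfl

-- ===== VERDICT (by name: the statement is the Claim_ definition above) =====
theorem tailPosition_spec : Claim_unchanged_tailPosition := by
  intro Road laneNum RoadLength _dom _pre hD
  exact main Road laneNum RoadLength (by unfold D_tailPosition at hD; exact hD)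

theorem tailPosition_changed : Claim_changed_tailPosition := by
  unfold Claim_changed_tailPosition
  refine ⟨by decide, by decide, by decide, ?_, ?_, by decide⟩
  · exact changed_A
  · exact changed_B

theorem tailPosition_tight : Claim_exact_tailPosition := by
  intro Road laneNum RoadLength _dom _pre hD
  exact tight Road laneNum RoadLength hD
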